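-- pv_equiv track=rewrite | github.com/pr0100smile/Tests | collections.py | uniq_names
-- ===== SOURCE A (Python) =====
-- def uniq_names(mentors):
--     # Добавляем в список всех преподавателей со всех курсов
--     all_list = []
--     for m in mentors:
--         all_list.extend(m)
--     # Код, который заполнит all_list.
--
--     # Делаем список all_names_list, состоящий только из имён, и заполняем его
--     all_names_list = []
--     for mentor in all_list:
--         name = mentor.split()[0]
--         all_names_list.append(name)
--     # Делаем так, чтобы остались только уникальные имена (без повторений)
--     unique_names = list(set(all_names_list))
--
--     # Теперь необходимо отсортировать имена в алфавитном порядке, используя sorted() для списка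
--     all_names_sorted = sorted(unique_names)
--     # Результат будет в all_names_sorted
--     return f'Уникальные имена преподавателей: {", ".join(all_names_sorted)}'
-- ===== SOURCE B (Python) =====
-- def uniq_names(mentors):
--     # Sort all first names (duplicates included), then one linear pass keeping
--     # each name only when it differs from the previously kept one: no set needed.
--     names = sorted(m.split()[0] for row in mentors for m in row)
--     out = []
--     prev = None
--     for n in names:
--         if n != prev:
--             out.append(n)
--             prev = n
--     return f'Уникальные имена преподавателей: {", ".join(out)}'
-- ===== Notes on version B (the rewrite author's own statement) =====
-- stated objective: alternative
-- what changed: Replaces hash-set deduplication of the name list with sorting the full multiset of first names once and removing duplicates in a single adjacent-comparison pass tracking the previously kept name.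
import Mathlib
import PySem

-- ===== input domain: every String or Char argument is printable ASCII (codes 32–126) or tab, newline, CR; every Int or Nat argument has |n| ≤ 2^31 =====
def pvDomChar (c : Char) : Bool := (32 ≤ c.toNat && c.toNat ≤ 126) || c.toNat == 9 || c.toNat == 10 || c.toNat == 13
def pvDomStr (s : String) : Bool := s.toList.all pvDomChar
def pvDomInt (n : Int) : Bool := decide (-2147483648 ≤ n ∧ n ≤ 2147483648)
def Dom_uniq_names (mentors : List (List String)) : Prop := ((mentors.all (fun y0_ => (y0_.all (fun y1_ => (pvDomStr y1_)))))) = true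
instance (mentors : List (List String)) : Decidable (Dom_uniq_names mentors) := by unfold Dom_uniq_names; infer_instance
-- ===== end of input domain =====

-- B replaces A's hash-set deduplication by sorting the full name list once and dropping
-- adjacent duplicates in one linear pass (objective: alternative, same asymptotic cost).

-- first word of s: s.split()[0]; total form pyGetD is exact under Pre_ (split() nonempty)
def pvFirstWord (s : String) : String := PySem.List.pyGetD (PySem.Str.split₀ s) 0 ""

-- ===== PORT A =====
def uniq_names (mentors : List (List String)) : String :=
  let all_list := mentors.foldl (fun acc m => acc ++ m) []
  let all_names_list := all_list.foldl (fun acc mentor => acc ++ [pvFirstWord mentor]) []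
  let unique_names := PySem.Set.ofList all_names_list
  let all_names_sorted := PySem.List.sorted unique_names (fun x => x) false
  "Уникальные имена преподавателей: " ++ PySem.Str.join ", " all_names_sorted

-- ===== PORT B =====
def uniq_names_alt (mentors : List (List String)) : String :=
  let names := PySem.List.sorted (mentors.flatMap (fun row => row.map (fun m => pvFirstWord m))) (fun x => x) false
  let out := (names.foldl
      (fun (p : List String × Option String) n =>
        if p.2 ≠ some n then (p.1 ++ [n], some n) else p)
      ([], none)).1
  "Уникальные имена преподавателей: " ++ PySem.Str.join ", " out

-- ===== PRECONDITION & SPEC =====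
-- Pre_ excludes exactly the inputs containing an empty/whitespace-only mentor string,
-- where Python's mentor.split()[0] raises IndexError in both A and B.
def Pre_uniq_names (mentors : List (List String)) : Prop :=
  ∀ row ∈ mentors, ∀ s ∈ row, PySem.Str.split₀ s ≠ []
instance (mentors : List (List String)) : Decidable (Pre_uniq_names mentors) := by
  unfold Pre_uniq_names; infer_instance

def pvWitness_uniq_names : List (List String) := [["Ann Lee", "Bob May"], ["Ann Smith"]]

def Spec_uniq_names (mentors : List (List String)) (out : String) : Prop := out = uniq_names_alt mentors
instance (mentors : List (List String)) (out : String) : Decidable (Spec_uniq_names mentors out) := by unfold Spec_uniq_names; infer_instance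

-- ===== CLAIM (what is proved, stated in full; the proofs are below) =====
def Claim_equal_uniq_names : Prop := ∀ (mentors : List (List String)), Dom_uniq_names mentors → Pre_uniq_names mentors → Spec_uniq_names mentors (uniq_names mentors)

-- ===== LEMMAS AND PROOFS =====

-- B's accumulator loop over a sorted list is List.destutter by disequality
theorem pv_foldl_destutter' (l : List String) (acc : List String) (a : String) :
    (l.foldl (fun (p : List String × Option String) n =>
        if p.2 ≠ some n then (p.1 ++ [n], some n) else p) (acc ++ [a], some a)).1
      = acc ++ List.destutter' (· ≠ ·) a l := by
  induction l generalizing acc a with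
  | nil => simp [List.destutter']
  | cons b l ih =>
    by_cases h : a = b
    · subst h
      simpa [List.destutter'_cons, List.foldl_cons] using ih acc a
    · have := ih (acc ++ [a]) b
      simp only [List.foldl_cons, List.destutter'_cons, if_pos h]
      simp only [List.append_assoc] at this ⊢
      simpa [h] using this

theorem pv_foldl_destutter (l : List String) :
    (l.foldl (fun (p : List String × Option String) n =>
        if p.2 ≠ some n then (p.1 ++ [n], some n) else p) ([], none)).1
      = List.destutter (· ≠ ·) l := by
  cases l with
  | nil => simp [List.destutter]
  | cons a l =>
    have := pv_foldl_destutter' l [] a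
    simpa [List.destutter_cons', List.foldl_cons] using this

-- sorted on set(xs) equals destutter-by-≠ of sorted on xs
theorem pv_sorted_set_eq_destutter_sorted (xs : List String) :
    PySem.List.sorted (PySem.Set.ofList xs) (fun x => x) false
      = List.destutter (· ≠ ·) (PySem.List.sorted xs (fun x => x) false) := by
  set ys := PySem.List.sorted xs (fun x => x) false with hys
  have hpw : ys.Pairwise (· ≤ ·) := PySem.List.sorted_pairwise xs (fun x => x)
  have hded : List.destutter (· ≠ ·) ys = ys.dedup := hpw.destutter_eq_dedup
  have hnd : (List.destutter (· ≠ ·) ys).Nodup := hded ▸ List.nodup_dedup ys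
  have hsub : (List.destutter (· ≠ ·) ys).Sublist ys := List.destutter_sublist (R := (· ≠ ·)) ys
  have hlt : (List.destutter (· ≠ ·) ys).Pairwise (· < ·) := by
    have h1 : (List.destutter (· ≠ ·) ys).Pairwise (· ≤ ·) := hpw.sublist hsub
    exact (h1.and hnd).imp (fun {a b} h => lt_of_le_of_ne h.1 h.2)
  have hperm : (List.destutter (· ≠ ·) ys).Perm (PySem.Set.ofList xs) := by
    refine (List.perm_ext_iff_of_nodup hnd (PySem.Set.nodup_ofList xs)).mpr ?_
    intro a
    rw [hded, List.mem_dedup, PySem.Set.mem_ofList]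
    exact ⟨fun h => (PySem.List.mem_sorted xs (fun x => x) false a).mp (hys ▸ h),
           fun h => hys ▸ (PySem.List.mem_sorted xs (fun x => x) false a).mpr h⟩
  exact PySem.List.sorted_eq_of_perm_of_pairwise_lt (PySem.Set.ofList xs) _ (fun x => x) hperm hlt

-- the two ports collect the same (multi)list of first names
theorem pv_names_eq (mentors : List (List String)) :
    (mentors.foldl (fun acc m => acc ++ m) []).foldl
        (fun acc mentor => acc ++ [pvFirstWord mentor]) []
      = mentors.flatMap (fun row => row.map (fun m => pvFirstWord m)) := by
  have h0 : ∀ (rs : List (List String)) (acc : List String),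
      rs.foldl (fun acc m => acc ++ m) acc = acc ++ rs.flatten := by
    intro rs
    induction rs with
    | nil => simp
    | cons r t ih => intro acc; simp [List.foldl_cons, ih]
  have h1 : mentors.foldl (fun acc m => acc ++ m) [] = mentors.flatten := by
    simpa using h0 mentors []
  have h2 : ∀ (l : List String) (acc : List String),
      l.foldl (fun acc mentor => acc ++ [pvFirstWord mentor]) acc
        = acc ++ l.map (fun m => pvFirstWord m) := by
    intro l
    induction l with
    | nil => simp
    | cons x t ih => intro acc; simp [List.foldl_cons, ih]
  rw [h1, h2, List.nil_append, List.map_flatten]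
  simp [List.flatMap_def]

-- ===== VERDICT (by name: the statement is the Claim_ definition above) =====
theorem uniq_names_spec : Claim_equal_uniq_names := by
  intro mentors _ _
  unfold Spec_uniq_names uniq_names uniq_names_alt
  dsimp only
  rw [pv_names_eq, pv_foldl_destutter, ← pv_sorted_set_eq_destutter_sorted]
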